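-- pv_equiv track=rewrite | github.com/iRomi14/SharpEyes | src/decoupage/RLSA.py | rlsa
-- ===== SOURCE A (Python) =====
-- def rlsa ( tabBin , seuil ):
--     i = 0;
--     taille = len(tabBin);
--     mem = 0;
--     while i < taille :
--
--         if ( tabBin[i] == 0 ):
--             #we see how many 0 there is
--             while ( tabBin[i] == 0 ):
--                 mem += 1;
--                 i +=1;
--                 if ( i >= taille ): #if the tab finish with 0
--                     break
--
--             if ( mem <= seuil ):
--                 #we can modify
--                 i = i - mem;
--                 for j in range ( i , i + mem ):
--                     tabBin[j] = 1;
--                 i = j;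
--
--         i += 1;
--         mem = 0;
--     return tabBin;
-- ===== SOURCE B (Python) =====
-- def _flush(run, seuil):
--     # a pending run of zeros: short runs become ones, long runs stay zeros
--     return [1] * len(run) if 0 < len(run) <= seuil else run
--
-- def rlsa(tabBin, seuil):
--     result = []
--     run = []  # current pending run of zeros
--     for x in tabBin:
--         if x == 0:
--             run.append(0)
--         else:
--             result.extend(_flush(run, seuil))
--             run = []
--             result.append(x)
--     result.extend(_flush(run, seuil))
--     tabBin[:] = result
--     return tabBin
-- ===== Notes on version B (the rewrite author's own statement) =====
-- stated objective: simpler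
-- what changed: Replaced A's index-based state machine (inner zero-counting while loop, pointer rewind i = i - mem, in-place refill loop) by a single accumulator pass that collects each pending zero-run in a list and flushes it as ones or zeros when a nonzero element or the end is reached.
import Mathlib
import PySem

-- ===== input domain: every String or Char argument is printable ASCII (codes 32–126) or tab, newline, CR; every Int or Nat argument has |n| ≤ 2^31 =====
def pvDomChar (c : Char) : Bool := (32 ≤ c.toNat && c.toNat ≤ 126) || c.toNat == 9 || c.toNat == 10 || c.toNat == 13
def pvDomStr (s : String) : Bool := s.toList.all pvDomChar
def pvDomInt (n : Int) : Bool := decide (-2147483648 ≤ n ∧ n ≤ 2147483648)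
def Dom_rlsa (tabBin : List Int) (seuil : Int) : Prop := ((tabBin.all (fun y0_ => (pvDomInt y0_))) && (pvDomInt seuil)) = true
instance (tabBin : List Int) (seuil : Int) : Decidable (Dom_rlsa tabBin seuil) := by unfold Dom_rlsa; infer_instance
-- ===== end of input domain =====

-- B replaces A's pointer-rewinding state machine by a single accumulator pass over the
-- elements (objective: simpler). Both Pythons mutate tabBin in place; the equivalence
-- proved here is about the RETURN value (B performs the same final in-place update).

-- ===== PORT A =====
-- inner `while tabBin[i]==0` loop: entered with tabBin[i]==0; does mem+=1, i+=1, breaks at end.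
-- The fuel argument only makes the recursion structural; with fuel ≥ tab.length it is never exhausted.
def innerA (tab : List Int) : Nat → Nat → Nat → Nat × Nat
  | 0, i, mem => (i, mem)
  | fuel + 1, i, mem =>
    if i + 1 ≥ tab.length then (i + 1, mem + 1)
    else if tab.getD (i + 1) 0 = 0 then innerA tab fuel (i + 1) (mem + 1)
    else (i + 1, mem + 1)

-- `for j in range(i, i+mem): tab[j] = 1`
def fillOnes (tab : List Int) (j : Nat) : Nat → List Int
  | 0 => tab
  | m + 1 => fillOnes (tab.set j 1) (j + 1) m

-- outer `while i < taille` loop; again fuel ≥ tab.length + 1 is never exhausted since i grows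
def outerA (seuil : Int) : Nat → List Int → Nat → List Int
  | 0, tab, _ => tab
  | fuel + 1, tab, i =>
    if i < tab.length then
      if tab.getD i 0 = 0 then
        let p := innerA tab tab.length i 0
        if (p.2 : Int) ≤ seuil then
          -- i = i - mem; fill; i = j; i += 1
          outerA seuil fuel (fillOnes tab (p.1 - p.2) p.2) (p.1 - p.2 + p.2 - 1 + 1)
        else
          outerA seuil fuel tab (p.1 + 1)
      else
        outerA seuil fuel tab (i + 1)
    else tab

def rlsa (tabBin : List Int) (seuil : Int) : List Int := outerA seuil (tabBin.length + 1) tabBin 0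

-- ===== PORT B =====
-- `[1]*len(run) if 0 < len(run) <= seuil else run`
def flushB (seuil : Int) (run : List Int) : List Int :=
  if 0 < run.length ∧ (run.length : Int) ≤ seuil then List.replicate run.length 1 else run

def goB (seuil : Int) (result run : List Int) : List Int → List Int
  | [] => result ++ flushB seuil run
  | x :: xs =>
      if x = 0 then goB seuil result (run ++ [0]) xs
      else goB seuil (result ++ flushB seuil run ++ [x]) [] xs

def rlsa_alt (tabBin : List Int) (seuil : Int) : List Int := goB seuil [] [] tabBin

-- ===== PRECONDITION & SPEC =====
def Spec_rlsa (tabBin : List Int) (seuil : Int) (out : List Int) : Prop := out = rlsa_alt tabBin seuil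
instance (tabBin : List Int) (seuil : Int) (out : List Int) : Decidable (Spec_rlsa tabBin seuil out) := by unfold Spec_rlsa; infer_instance

-- ===== CLAIM (what is proved, stated in full; the proofs are below) =====
def Claim_equal_rlsa : Prop := ∀ (tabBin : List Int) (seuil : Int), Dom_rlsa tabBin seuil → Spec_rlsa tabBin seuil (rlsa tabBin seuil)

-- ===== LEMMAS AND PROOFS =====

-- count of leading zeros
def czeros : List Int → Nat
  | [] => 0
  | x :: xs => if x = 0 then czeros xs + 1 else 0

-- common functional specification: each maximal zero-run of length ≤ seuil becomes ones
def flushS (seuil : Int) (k : Nat) : List Int :=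
  if 0 < k ∧ (k : Int) ≤ seuil then List.replicate k 1 else List.replicate k 0

def spec (seuil : Int) : List Int → List Int
  | [] => []
  | x :: xs =>
      if x = 0 then flushS seuil (czeros xs + 1) ++ spec seuil (xs.drop (czeros xs))
      else x :: spec seuil xs
termination_by l => l.length
decreasing_by all_goals simp only [List.length_drop, List.length_cons]; omega

theorem czeros_le (xs : List Int) : czeros xs ≤ xs.length := by
  induction xs with
  | nil => simp [czeros]
  | cons x xs ih => by_cases h : x = 0 <;> simp [czeros, h] <;> omega

theorem czeros_rep (k : Nat) (xs : List Int) :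
    czeros (List.replicate k 0 ++ xs) = k + czeros xs := by
  induction k with
  | zero => simp
  | succ k ih => simp [List.replicate_succ, czeros, ih]; omega

theorem czeros_decomp (xs : List Int) :
    List.replicate (czeros xs) 0 ++ xs.drop (czeros xs) = xs := by
  induction xs with
  | nil => simp [czeros]
  | cons x xs ih =>
    by_cases h : x = 0
    · simp [czeros, h, List.replicate_succ, ih]
    · simp [czeros, h]

theorem czeros_drop (xs : List Int) : czeros (xs.drop (czeros xs)) = 0 := by
  induction xs with
  | nil => simp [czeros]
  | cons x xs ih =>
    by_cases h : x = 0
    · simp [czeros, h, ih]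
    · simp [czeros, h]

theorem spec_rep (seuil : Int) (k : Nat) (xs : List Int) (hx : czeros xs = 0) :
    spec seuil (List.replicate k 0 ++ xs) = flushS seuil k ++ spec seuil xs := by
  cases k with
  | zero => simp [flushS]
  | succ k =>
    rw [List.replicate_succ, List.cons_append, spec, if_pos rfl, czeros_rep, hx,
      Nat.add_zero, List.drop_left' (by simp)]

theorem flushB_rep (seuil : Int) (k : Nat) :
    flushB seuil (List.replicate k 0) = flushS seuil k := by
  simp only [flushB, flushS, List.length_replicate]

theorem goB_spec (seuil : Int) (xs : List Int) : ∀ (res : List Int) (k : Nat),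
    goB seuil res (List.replicate k 0) xs = res ++ spec seuil (List.replicate k 0 ++ xs) := by
  induction xs with
  | nil =>
    intro res k
    simp only [goB, List.append_nil, flushB_rep]
    have hs := spec_rep seuil k [] rfl
    simp only [List.append_nil] at hs
    rw [hs]
    simp [spec]
  | cons x xs ih =>
    intro res k
    by_cases h : x = 0
    · subst h
      simp only [goB, if_pos rfl]
      rw [← List.replicate_succ', ih res (k + 1), List.replicate_succ']
      simp [List.append_assoc]
    · simp only [goB, if_neg h]
      have hx := ih (res ++ flushB seuil (List.replicate k 0) ++ [x]) 0
      simp only [List.replicate_zero, List.nil_append] at hx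
      rw [hx]
      rw [spec_rep seuil k (x :: xs) (by simp [czeros, h])]
      simp only [List.replicate_zero, List.nil_append, flushB_rep]
      rw [spec, if_neg h]
      simp [List.append_assoc]

theorem fill_eq (m : Nat) : ∀ (tab : List Int) (i : Nat), i + m ≤ tab.length →
    fillOnes tab i m = tab.take i ++ List.replicate m 1 ++ tab.drop (i + m) := by
  induction m with
  | zero => intro tab i h; simp [fillOnes]
  | succ m ih =>
    intro tab i h
    rw [fillOnes, ih _ _ (by simp; omega)]
    rw [List.set_eq_take_cons_drop 1 (by omega)]
    have hlen : (tab.take i ++ [(1 : Int)]).length = i + 1 := by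
      simp [List.length_take]; omega
    have h1 : ((tab.take i ++ (1 : Int) :: tab.drop (i + 1))).take (i + 1)
        = tab.take i ++ [(1 : Int)] := by
      rw [show tab.take i ++ (1 : Int) :: tab.drop (i + 1)
            = (tab.take i ++ [(1 : Int)]) ++ tab.drop (i + 1) by simp]
      exact List.take_left' hlen
    have h2 : ((tab.take i ++ (1 : Int) :: tab.drop (i + 1))).drop (i + 1 + m)
        = tab.drop (i + (m + 1)) := by
      rw [show tab.take i ++ (1 : Int) :: tab.drop (i + 1)
            = (tab.take i ++ [(1 : Int)]) ++ tab.drop (i + 1) by simp]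
      rw [List.drop_append]
      rw [List.drop_eq_nil_of_le (by rw [hlen]; omega)]
      rw [hlen, List.drop_drop, List.nil_append]
      congr 1
      omega
    rw [h1, h2]
    simp [List.replicate_succ, List.append_assoc]

theorem innerA_czeros (tab : List Int) : ∀ (n i mem : Nat), tab.length - i ≤ n →
    i < tab.length → tab.getD i 0 = 0 →
    innerA tab n i mem = (i + czeros (tab.drop i), mem + czeros (tab.drop i)) := by
  intro n
  induction n with
  | zero => intro i mem h hi _; omega
  | succ n ih =>
    intro i mem h hi hz
    have hzi : tab[i] = 0 := by rwa [List.getD_eq_getElem tab 0 hi] at hz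
    have hdi : tab.drop i = tab[i] :: tab.drop (i + 1) := List.drop_eq_getElem_cons hi
    have hcz : czeros (tab.drop i) = czeros (tab.drop (i + 1)) + 1 := by
      rw [hdi, hzi]; simp [czeros]
    rw [innerA]
    split
    · rename_i h1
      have : tab.drop (i + 1) = [] := List.drop_eq_nil_of_le (by omega)
      rw [hcz, this]
      simp only [czeros, Prod.mk.injEq]
    · split
      · rename_i h1 h2
        rw [ih (i + 1) (mem + 1) (by omega) (by omega) h2, hcz]
        simp only [Prod.mk.injEq]
        omega
      · rename_i h1 h2
        have hi1 : i + 1 < tab.length := by omega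
        have : tab[i + 1] ≠ 0 := by rwa [List.getD_eq_getElem tab 0 hi1] at h2
        have hd1 : tab.drop (i + 1) = tab[i + 1] :: tab.drop (i + 1 + 1) :=
          List.drop_eq_getElem_cons hi1
        have : czeros (tab.drop (i + 1)) = 0 := by rw [hd1]; simp [czeros, this]
        rw [hcz, this]

theorem outerA_spec (seuil : Int) : ∀ (n : Nat) (tab : List Int) (i : Nat),
    tab.length - i < n →
    outerA seuil n tab i = tab.take i ++ spec seuil (tab.drop i) := by
  intro n
  induction n with
  | zero => intro tab i h; omega
  | succ n ih =>
    intro tab i h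
    by_cases hi : i < tab.length
    · rw [outerA, if_pos hi]
      by_cases hz : tab.getD i 0 = 0
      · rw [if_pos hz]
        have hzi : tab[i] = 0 := by rwa [List.getD_eq_getElem tab 0 hi] at hz
        have hdi : tab.drop i = tab[i] :: tab.drop (i + 1) := List.drop_eq_getElem_cons hi
        set m := czeros (tab.drop i) with hm
        have hm1 : 1 ≤ m := by rw [hm, hdi, hzi]; simp [czeros]
        have hmlen : i + m ≤ tab.length := by
          have h1 := czeros_le (tab.drop i)
          rw [← hm] at h1
          simp only [List.length_drop] at h1
          omega
        have hinner : innerA tab tab.length i 0 = (i + m, 0 + m) :=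
          innerA_czeros tab tab.length i 0 (by omega) hi hz
        simp only [hinner, Nat.zero_add]
        have hdecomp : List.replicate m 0 ++ tab.drop (i + m) = tab.drop i := by
          have h1 := czeros_decomp (tab.drop i)
          rwa [← hm, List.drop_drop] at h1
        have hrest0 : czeros (tab.drop (i + m)) = 0 := by
          have h1 := czeros_drop (tab.drop i)
          rwa [← hm, List.drop_drop] at h1
        have hspec : spec seuil (tab.drop i) = flushS seuil m ++ spec seuil (tab.drop (i + m)) := by
          rw [← hdecomp, spec_rep seuil m _ hrest0]
        have htab : (tab.take i ++ List.replicate m 0) ++ tab.drop (i + m) = tab := by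
          rw [List.append_assoc, hdecomp, List.take_append_drop]
        have hlen_tr : (tab.take i ++ List.replicate m 0).length = i + m := by
          simp [List.length_take]; omega
        by_cases hs : (m : Int) ≤ seuil
        · rw [if_pos hs]
          have e1 : i + m - m = i := by omega
          rw [e1]
          have e2 : i + m - 1 + 1 = i + m := by omega
          rw [e2]
          rw [fill_eq m tab i hmlen]
          have hTlen : (tab.take i ++ List.replicate m 1).length = i + m := by
            simp [List.length_take]; omega
          rw [ih _ (i + m) (by simp [List.length_take]; omega)]
          rw [List.take_left' hTlen, List.drop_left' hTlen]
          rw [hspec]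
          have hflush : flushS seuil m = List.replicate m 1 := by
            rw [flushS, if_pos ⟨by omega, hs⟩]
          rw [hflush]
          simp [List.append_assoc]
        · rw [if_neg hs]
          rw [ih tab (i + m + 1) (by omega)]
          rw [hspec]
          have hflush : flushS seuil m = List.replicate m 0 := by
            rw [flushS, if_neg (fun hc => hs hc.2)]
          rw [hflush]
          by_cases hend : i + m < tab.length
          · have hy : tab.drop (i + m) = tab[i + m] :: tab.drop (i + m + 1) :=
              List.drop_eq_getElem_cons hend
            have hy0 : tab[i + m] ≠ 0 := by
              intro h0
              rw [hy, h0] at hrest0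
              simp [czeros] at hrest0
            rw [hy, spec, if_neg hy0]
            have htk : tab.take (i + m) = tab.take i ++ List.replicate m 0 := by
              conv_lhs => rw [← htab]
              rw [List.take_left' hlen_tr]
            have htake : tab.take (i + m + 1) = tab.take (i + m) ++ [tab[i + m]] := by
              rw [← List.take_concat_get hend, List.concat_eq_append]
            rw [htake, htk]
            simp [List.append_assoc]
          · have hnil : tab.drop (i + m) = [] := List.drop_eq_nil_of_le (by omega)
            rw [hnil]
            rw [List.drop_eq_nil_of_le (by omega), List.take_of_length_le (by omega)]
            conv_lhs => rw [← htab]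
            rw [hnil]
            simp [spec]
      · rw [if_neg hz]
        rw [ih tab (i + 1) (by omega)]
        have hx : tab[i] ≠ 0 := by rwa [List.getD_eq_getElem tab 0 hi] at hz
        rw [List.drop_eq_getElem_cons hi, spec, if_neg hx]
        rw [← List.take_concat_get hi, List.concat_eq_append, List.append_assoc,
          List.singleton_append]
    · rw [outerA, if_neg hi]
      rw [List.drop_eq_nil_of_le (by omega), List.take_of_length_le (by omega)]
      simp [spec]

-- ===== VERDICT (by name: the statement is the Claim_ definition above) =====
theorem rlsa_spec : Claim_equal_rlsa := by
  intro tab seuil _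
  unfold Spec_rlsa rlsa rlsa_alt
  have hA := outerA_spec seuil (tab.length + 1) tab 0 (by omega)
  have hB := goB_spec seuil tab [] 0
  simp at hA hB
  rw [hA, hB]
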